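-- pv_equiv track=rewrite | github.com/asadullahbro/SimpleBanking | app/main.py | verify_password_complexity
-- ===== SOURCE A (Python) =====
-- def verify_password_complexity(password: str) -> bool:
--     """Verify password meets complexity requirements"""
--     if len(password) < 8:
--         return False
--     if not any(c.islower() for c in password):
--         return False
--     if not any(c.isupper() for c in password):
--         return False
--     if not any(c.isdigit() for c in password):
--         return False
--     if not any(c in "!@#$%^&*()-_=+[]{}|;:'\",.<>?/`~" for c in password):
--         return False
--     return True
-- ===== SOURCE B (Python) =====
-- def verify_password_complexity(password: str) -> bool:
--     """Verify password meets complexity requirements (single pass over the string)."""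
--     has_lower = has_upper = has_digit = has_special = False
--     for c in password:
--         if c.islower():
--             has_lower = True
--         if c.isupper():
--             has_upper = True
--         if c.isdigit():
--             has_digit = True
--         if c in "!@#$%^&*()-_=+[]{}|;:'\",.<>?/`~":
--             has_special = True
--     return len(password) >= 8 and has_lower and has_upper and has_digit and has_special
-- ===== Notes on version B (the rewrite author's own statement) =====
-- stated objective: alternative
-- what changed: Replaces A's early-return chain of four separate short-circuiting any() scans with a single pass over the string that accumulates four boolean flags, combined with the length check in one final conjunction.
import Mathlib
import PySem

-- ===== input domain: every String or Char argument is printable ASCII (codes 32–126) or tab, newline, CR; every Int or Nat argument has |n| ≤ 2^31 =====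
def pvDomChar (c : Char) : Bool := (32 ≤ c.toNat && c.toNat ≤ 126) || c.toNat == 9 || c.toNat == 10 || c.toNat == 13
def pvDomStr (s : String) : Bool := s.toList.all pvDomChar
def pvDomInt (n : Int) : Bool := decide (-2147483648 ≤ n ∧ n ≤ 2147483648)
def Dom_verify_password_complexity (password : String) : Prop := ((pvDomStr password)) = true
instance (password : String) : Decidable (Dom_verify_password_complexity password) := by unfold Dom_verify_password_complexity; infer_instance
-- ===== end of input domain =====

-- B replaces A's four separate short-circuiting scans by one pass accumulating four flags (objective: simpler/alternative, same cost).

def pvSpecials : List Char := "!@#$%^&*()-_=+[]{}|;:'\",.<>?/`~".toList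

-- ===== PORT A =====
def verify_password_complexity (password : String) : Bool :=
  if PySem.Str.len password < 8 then false
  else if !(password.toList.any (fun c => PySem.Chars.islower c)) then false
  else if !(password.toList.any (fun c => PySem.Chars.isupper c)) then false
  else if !(password.toList.any (fun c => PySem.Chars.isdigit c)) then false
  else if !(password.toList.any (fun c => pvSpecials.contains c)) then false
  else true

-- ===== PORT B =====
def vpcStep (st : Bool × Bool × Bool × Bool) (c : Char) : Bool × Bool × Bool × Bool :=
  let st := if PySem.Chars.islower c then (true, st.2) else st
  let st := if PySem.Chars.isupper c then (st.1, true, st.2.2) else st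
  let st := if PySem.Chars.isdigit c then (st.1, st.2.1, true, st.2.2.2) else st
  if pvSpecials.contains c then (st.1, st.2.1, st.2.2.1, true) else st

def verify_password_complexity_alt (password : String) : Bool :=
  let st := password.toList.foldl vpcStep (false, false, false, false)
  decide (8 ≤ PySem.Str.len password) && st.1 && st.2.1 && st.2.2.1 && st.2.2.2

-- ===== PRECONDITION & SPEC =====
def Spec_verify_password_complexity (password : String) (out : Bool) : Prop := out = verify_password_complexity_alt password
instance (password : String) (out : Bool) : Decidable (Spec_verify_password_complexity password out) := by unfold Spec_verify_password_complexity; infer_instance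

-- ===== CLAIM (what is proved, stated in full; the proofs are below) =====
def Claim_equal_verify_password_complexity : Prop := ∀ (password : String), Dom_verify_password_complexity password → Spec_verify_password_complexity password (verify_password_complexity password)

-- ===== LEMMAS AND PROOFS =====

theorem vpcStep_foldl (xs : List Char) (l u d s : Bool) :
    xs.foldl vpcStep (l, u, d, s) =
      (l || xs.any (fun c => PySem.Chars.islower c),
       u || xs.any (fun c => PySem.Chars.isupper c),
       d || xs.any (fun c => PySem.Chars.isdigit c),
       s || xs.any (fun c => pvSpecials.contains c)) := by
  induction xs generalizing l u d s with
  | nil => simp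
  | cons c cs ih =>
    simp only [List.foldl_cons, List.any_cons, vpcStep]
    split_ifs <;> simp [ih] <;> simp_all

theorem verify_password_complexity_spec : Claim_equal_verify_password_complexity := by
  intro password _
  show verify_password_complexity password = verify_password_complexity_alt password
  unfold verify_password_complexity verify_password_complexity_alt
  simp only [vpcStep_foldl, Bool.false_or]
  split_ifs with h1 h2 h3 h4 h5 <;> simp_all
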